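-- pv_equiv track=rewrite | github.com/kmcos/kmcos | kmcos/run/__init__.py | get_species_coordinates
-- ===== SOURCE A (Python) =====
-- def get_species_coordinates(config, species):
--     """
--     Gets the species coordinates from a 4d list and appends it into a 2d array that's then returned
--     """
--     species_coords = []
--     for k in range(len(species)):
--         species_coords.append([])
--         for i in range(len(config)):
--             for j in range(len(config[0])):
--                 if (config[i][j][0][0] == k):
--                     species_coords[k].append([i,j])
--     return species_coords
-- ===== SOURCE B (Python) =====
-- def get_species_coordinates(config, species):
--     """Single pass over the grid, bucketing each cell by its species index."""
--     buckets = [[] for _ in species]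
--     width = len(config[0]) if config else 0
--     for i, row in enumerate(config):
--         for j in range(width):
--             s = row[j][0][0]
--             if 0 <= s < len(buckets):
--                 buckets[s].append([i, j])
--     return buckets
-- ===== Notes on version B (the rewrite author's own statement) =====
-- stated objective: faster
-- what changed: A rescans the whole grid once per species index (O(S*N*M)); B makes one pass over the grid and buckets each cell into its species' list directly (O(S + N*M)).
import Mathlib
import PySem

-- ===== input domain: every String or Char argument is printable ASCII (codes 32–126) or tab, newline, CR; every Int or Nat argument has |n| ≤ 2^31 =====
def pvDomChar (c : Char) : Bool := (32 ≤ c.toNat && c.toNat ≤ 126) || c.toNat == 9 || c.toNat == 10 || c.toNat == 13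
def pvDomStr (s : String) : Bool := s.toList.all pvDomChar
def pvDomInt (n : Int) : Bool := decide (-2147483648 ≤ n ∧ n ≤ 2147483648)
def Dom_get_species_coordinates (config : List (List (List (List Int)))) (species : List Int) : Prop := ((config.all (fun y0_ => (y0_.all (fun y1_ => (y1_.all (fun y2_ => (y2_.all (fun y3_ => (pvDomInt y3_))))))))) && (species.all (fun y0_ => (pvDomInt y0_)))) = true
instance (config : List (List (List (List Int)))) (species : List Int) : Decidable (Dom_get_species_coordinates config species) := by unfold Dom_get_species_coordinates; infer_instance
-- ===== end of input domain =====

-- B replaces A's per-species rescans of the whole grid by ONE pass over the grid that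
-- buckets each cell into its species' list (objective: faster, asymptotically).

-- ===== PORT A =====
def get_species_coordinates (config : List (List (List (List Int)))) (species : List Int) : List (List (List Int)) :=
  (PySem.List.pyRange 0 species.length 1).foldl (fun sc k =>
    sc ++ [(PySem.List.pyRange 0 config.length 1).foldl (fun bk i =>
      (PySem.List.pyRange 0 (PySem.List.pyGetD config 0 []).length 1).foldl (fun bk2 j =>
        if PySem.List.pyGetD (PySem.List.pyGetD (PySem.List.pyGetD (PySem.List.pyGetD config i []) j []) 0 []) 0 0 = k
        then bk2 ++ [[i, j]] else bk2) bk) []]) []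

-- ===== PORT B =====
def get_species_coordinates_alt (config : List (List (List (List Int)))) (species : List Int) : List (List (List Int)) :=
  (PySem.List.enumerate config 0).foldl (fun buckets p =>
    (PySem.List.pyRange 0 (PySem.List.pyGetD config 0 []).length 1).foldl (fun bks j =>
      let s := PySem.List.pyGetD (PySem.List.pyGetD (PySem.List.pyGetD p.2 j []) 0 []) 0 0
      if 0 ≤ s ∧ s < (bks.length : Int) then
        PySem.List.pySetD bks s (PySem.List.pyGetD bks s [] ++ [[p.1, j]])
      else bks) buckets)
  (species.map (fun _ => ([] : List (List Int))))

-- ===== PRECONDITION & SPEC =====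
-- Pre_ excludes exactly the inputs on which Python A raises IndexError: a row shorter
-- than the first row (config[i][j] out of range), or a cell whose first component is
-- missing or empty (config[i][j][0][0] out of range).
def Pre_get_species_coordinates (config : List (List (List (List Int)))) (species : List Int) : Prop :=
  ∀ row ∈ config, (config.headD []).length ≤ row.length ∧
    ∀ j < (config.headD []).length, (row.getD j []).getD 0 [] ≠ []
instance (config : List (List (List (List Int)))) (species : List Int) : Decidable (Pre_get_species_coordinates config species) := by unfold Pre_get_species_coordinates; infer_instance
def pvWitness_get_species_coordinates : List (List (List (List Int))) × List Int := ([[[[0]]]], [7])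

def Spec_get_species_coordinates (config : List (List (List (List Int)))) (species : List Int) (out : List (List (List Int))) : Prop := out = get_species_coordinates_alt config species
instance (config : List (List (List (List Int)))) (species : List Int) (out : List (List (List Int))) : Decidable (Spec_get_species_coordinates config species out) := by unfold Spec_get_species_coordinates; infer_instance

-- ===== CLAIM (what is proved, stated in full; the proofs are below) =====
def Claim_equal_get_species_coordinates : Prop := ∀ (config : List (List (List (List Int)))) (species : List Int), Dom_get_species_coordinates config species → Pre_get_species_coordinates config species → Spec_get_species_coordinates config species (get_species_coordinates config species)

-- ===== LEMMAS AND PROOFS =====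

-- 'out.append(g(k))' loop shape
theorem pvFoldlSnocMap {α β : Type} (g : α → β) (l : List α) (init : List β) :
    l.foldl (fun a x => a ++ [g x]) init = init ++ l.map g := by
  induction l generalizing init with
  | nil => simp
  | cons x xs ih => simp [ih]

-- 'if q(y): out.append(f(y))' loop shape
theorem pvFoldlIfSnoc {β γ : Type} (q : β → Prop) [DecidablePred q] (f : β → γ)
    (L : List β) (a : List γ) :
    L.foldl (fun a2 y => if q y then a2 ++ [f y] else a2) a
      = a ++ (L.filter (fun y => decide (q y))).map f := by
  induction L generalizing a with
  | nil => simp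
  | cons y ys ih =>
    by_cases h : q y <;> simp [h, ih]

-- nested filtered-append loops flatten to one filtered pass over the pair list
theorem pvFoldlIfSnoc2 {α β γ : Type} (p : α → β → Prop) [∀ x y, Decidable (p x y)]
    (f : α → β → γ) (L1 : List α) (L2 : List β) (init : List γ) :
    L1.foldl (fun a x => L2.foldl (fun a2 y => if p x y then a2 ++ [f x y] else a2) a) init
      = init ++ ((L1.flatMap (fun x => L2.map (fun y => (x, y)))).filter
          (fun c => decide (p c.1 c.2))).map (fun c => f c.1 c.2) := by
  induction L1 generalizing init with
  | nil => simp
  | cons x xs ih =>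
    simp only [List.foldl_cons, List.flatMap_cons, List.filter_append, List.map_append,
      pvFoldlIfSnoc (fun y => p x y) (fun y => f x y) L2 init, ih, List.filter_map,
      List.map_map]
    simp [List.append_assoc, Function.comp_def]

-- a fold of folds is a fold over the flattened pair list
theorem pvFoldlNestedFlat {α β γ : Type} (L1 : List α) (L2 : List β)
    (F : γ → α → β → γ) (init : γ) :
    L1.foldl (fun a x => L2.foldl (fun a2 y => F a2 x y) a) init
      = (L1.flatMap (fun x => L2.map (fun y => (x, y)))).foldl (fun a c => F a c.1 c.2) init := by
  induction L1 generalizing init with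
  | nil => simp
  | cons x xs ih => simp [List.foldl_append, List.foldl_map, ih]

-- the bucketing step of B
def pvStep (v : Int × Int → Int) (a : List (List (List Int))) (c : Int × Int) :
    List (List (List Int)) :=
  if 0 ≤ v c ∧ v c < (a.length : Int) then
    PySem.List.pySetD a (v c) (PySem.List.pyGetD a (v c) [] ++ [[c.1, c.2]])
  else a

theorem pvStep_length (v : Int × Int → Int) (a : List (List (List Int))) (c : Int × Int) :
    (pvStep v a c).length = a.length := by
  unfold pvStep
  split_ifs with h
  · rw [PySem.List.pySetD_of_nonneg _ _ h.1]; simp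
  · rfl

-- bucket invariant: after folding the cell list L, bucket k holds its old content
-- followed by the cells of L whose value is k, in order
theorem pvBucketInv (v : Int × Int → Int) (L : List (Int × Int))
    (bks : List (List (List Int))) :
    (L.foldl (pvStep v) bks).length = bks.length ∧
    ∀ k : Nat, k < bks.length →
      (L.foldl (pvStep v) bks).getD k []
        = bks.getD k [] ++ (L.filter (fun c => decide (v c = (k : Int)))).map
            (fun c => [c.1, c.2]) := by
  induction L generalizing bks with
  | nil => simp
  | cons c L ih =>
    have hlen : (pvStep v bks c).length = bks.length := pvStep_length v bks c
    obtain ⟨ihl, ihk⟩ := ih (pvStep v bks c)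
    refine ⟨by rw [List.foldl_cons, ihl, hlen], ?_⟩
    intro k hk
    rw [List.foldl_cons, ihk k (by omega)]
    by_cases hg : 0 ≤ v c ∧ v c < (bks.length : Int)
    · have hset : pvStep v bks c
          = bks.set (v c).toNat (PySem.List.pyGetD bks (v c) [] ++ [[c.1, c.2]]) := by
        unfold pvStep
        rw [if_pos hg, PySem.List.pySetD_of_nonneg _ _ hg.1]
      by_cases he : v c = (k : Int)
      · have hkt : (v c).toNat = k := by omega
        have hget : PySem.List.pyGetD bks (v c) [] = bks.getD k [] := by
          rw [he]; simp [PySem.List.pyGetD_natCast]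
        rw [hset, hkt]
        simp [List.getD, hk, he]
      · have hkt : (v c).toNat ≠ k := by omega
        rw [hset]
        simp [List.getD, List.getElem?_set_ne hkt, he]
    · have he : v c ≠ (k : Int) := by
        intro h; exact hg ⟨by omega, by omega⟩
      unfold pvStep
      rw [if_neg hg]
      simp [he]

-- the canonical value both programs compute
theorem pvMain (config : List (List (List (List Int)))) (species : List Int) :
    get_species_coordinates config species = get_species_coordinates_alt config species := by
  set W : List Int := PySem.List.pyRange 0 (PySem.List.pyGetD config 0 []).length 1 with hW
  set v : Int × Int → Int := fun c =>
    PySem.List.pyGetD (PySem.List.pyGetD (PySem.List.pyGetD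
      (PySem.List.pyGetD config c.1 []) c.2 []) 0 []) 0 0 with hv
  set cells : List (Int × Int) :=
    (PySem.List.pyRange 0 config.length 1).flatMap (fun i => W.map (fun j => (i, j)))
    with hcells
  -- A in canonical form
  have hA : get_species_coordinates config species
      = (PySem.List.pyRange 0 species.length 1).map (fun k =>
          (cells.filter (fun c => decide (v c = k))).map (fun c => [c.1, c.2])) := by
    unfold get_species_coordinates
    rw [pvFoldlSnocMap]
    refine (List.nil_append _).symm ▸ ?_
    apply List.map_congr_left
    intro k _
    rw [pvFoldlIfSnoc2 (fun i j =>
      PySem.List.pyGetD (PySem.List.pyGetD (PySem.List.pyGetD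
        (PySem.List.pyGetD config i []) j []) 0 []) 0 0 = k) (fun i j => [i, j])]
    simp [hcells, hW, hv]
  -- B in canonical form: a single fold of pvStep over cells
  have hB : get_species_coordinates_alt config species
      = cells.foldl (pvStep v) (species.map (fun _ => ([] : List (List Int)))) := by
    unfold get_species_coordinates_alt
    rw [PySem.List.enumerate_eq_map_pyRange config ([] : List (List (List Int))),
      List.foldl_map, hcells]
    have hstep : (fun (a : List (List (List Int))) (c : Int × Int) => pvStep v a (c.1, c.2))
        = pvStep v := by funext a c; rfl
    rw [← hstep]
    refine Eq.trans ?_ (pvFoldlNestedFlat (PySem.List.pyRange 0 config.length 1) W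
      (fun a i j => pvStep v a (i, j)) _)
    congr 1
  rw [hA, hB]
  obtain ⟨hlen, hbucket⟩ :=
    pvBucketInv v cells (species.map (fun _ => ([] : List (List Int))))
  apply List.ext_getElem
  · simpa [PySem.List.length_pyRange_one] using hlen.symm
  · intro m h1 h2
    have hm : m < species.length := by
      simpa [PySem.List.length_pyRange_one] using h1
    have hgd : (cells.foldl (pvStep v) (species.map (fun _ => ([] : List (List Int))))).getD m []
        = (cells.filter (fun c => decide (v c = (m : Int)))).map (fun c => [c.1, c.2]) := by
      rw [hbucket m (by simpa using hm)]
      simp [List.getD]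
    have : (cells.foldl (pvStep v) (species.map (fun _ => ([] : List (List Int)))))[m]
        = (cells.foldl (pvStep v) (species.map (fun _ => ([] : List (List Int))))).getD m [] := by
      rw [List.getD_eq_getElem _ _ h2]
    rw [this, hgd]
    rw [List.getElem_map, PySem.List.getElem_pyRange_one]
    norm_num

-- ===== VERDICT (by name: the statement is the Claim_ definition above) =====
theorem get_species_coordinates_spec : Claim_equal_get_species_coordinates := by
  intro config species _ _
  unfold Spec_get_species_coordinates
  exact pvMain config species
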